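-- pv_equiv track=rewrite | github.com/effoT/codingbat-py | String-2.py | plusOut
-- ===== SOURCE A (Python) =====
-- def plusOut(text, word):
--     new_text = ""
--     o = 0
--     while(o < len(text)):
--         if text[o:o+len(word)] == word:
--             new_text += word
--             o += len(word)
--         else:
--             new_text += "+"
--             o += 1
--     return new_text
-- ===== SOURCE B (Python) =====
-- def plusOut(text, word):
--     n, w = len(text), len(word)
--     if w == 0:
--         return text  # every position is an occurrence of the empty word
--     parts = []
--     i = 0
--     while i < n:
--         j = text.find(word, i)
--         if j == -1:
--             parts.append("+" * (n - i))
--             break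
--         parts.append("+" * (j - i))
--         parts.append(word)
--         i = j + w
--     return "".join(parts)
-- ===== Notes on version B (the rewrite author's own statement) =====
-- stated objective: faster
-- what changed: Instead of testing a word-sized slice at every single position while growing the result by += (quadratic concatenation), B jumps directly between occurrences with str.find, fills the gaps with '+'-runs and joins the pieces once at the end.
import Mathlib
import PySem

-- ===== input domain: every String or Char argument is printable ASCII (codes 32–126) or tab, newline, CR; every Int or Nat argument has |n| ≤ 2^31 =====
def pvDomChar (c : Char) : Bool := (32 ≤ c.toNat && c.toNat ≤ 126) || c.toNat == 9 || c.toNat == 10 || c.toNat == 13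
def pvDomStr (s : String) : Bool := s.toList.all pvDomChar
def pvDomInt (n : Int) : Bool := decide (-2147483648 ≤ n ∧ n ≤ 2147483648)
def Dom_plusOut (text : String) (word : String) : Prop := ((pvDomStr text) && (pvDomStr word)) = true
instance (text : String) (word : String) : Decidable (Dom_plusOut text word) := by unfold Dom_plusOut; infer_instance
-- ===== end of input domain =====

-- B replaces A's position-by-position slice comparison by find-and-jump between occurrences; objective: faster (constant-factor, measured).

-- ===== PORT A =====
-- A's while loop over the cursor o; fuel = text.length bounds the iterations (o advances
-- by ≥ 1 each round whenever word ≠ "", the case Pre_ admits; fuel 0 only cuts the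
-- diverging word = "" runs, which are outside Pre_).
def plusOutLoopA (t w : List Char) (o : Nat) (fuel : Nat) : List Char :=
  match fuel with
  | 0 => []
  | fuel + 1 =>
    if o < t.length then
      if PySem.List.slice t (some (o : Int)) (some ((o : Int) + (w.length : Int))) = w then
        w ++ plusOutLoopA t w (o + w.length) fuel
      else
        '+' :: plusOutLoopA t w (o + 1) fuel
    else []

def plusOut (text : String) (word : String) : String :=
  String.ofList (plusOutLoopA text.toList word.toList 0 text.toList.length)

-- ===== PORT B =====
-- B's while loop: jump to the next occurrence with find(word, i); fuel as in A's port.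
def plusOutLoopB (t w : List Char) (i : Nat) (fuel : Nat) : List Char :=
  match fuel with
  | 0 => []
  | fuel + 1 =>
    if i < t.length then
      let j := PySem.Chars.findFrom t w (i : Int) none
      if j = -1 then
        List.replicate (t.length - i) '+'
      else
        List.replicate (j.toNat - i) '+' ++ w ++ plusOutLoopB t w (j.toNat + w.length) fuel
    else []

def plusOut_alt (text : String) (word : String) : String :=
  if word.length = 0 then text
  else String.ofList (plusOutLoopB text.toList word.toList 0 text.toList.length)

-- ===== PRECONDITION & SPEC =====
-- Pre_ excludes only the inputs (word = "" with text ≠ "") on which A's loop never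
-- terminates (the slice test always matches and o never advances); A returns on all others.
def Pre_plusOut (text : String) (word : String) : Prop := word ≠ "" ∨ text = ""
instance (text : String) (word : String) : Decidable (Pre_plusOut text word) := by
  unfold Pre_plusOut; infer_instance
def pvWitness_plusOut : String × String := ("abcbc", "bc")
def Spec_plusOut (text : String) (word : String) (out : String) : Prop := out = plusOut_alt text word
instance (text : String) (word : String) (out : String) : Decidable (Spec_plusOut text word out) := by
  unfold Spec_plusOut; infer_instance

-- ===== CLAIM (what is proved, stated in full; the proofs are below) =====
def Claim_equal_plusOut : Prop := ∀ (text : String) (word : String), Dom_plusOut text word → Pre_plusOut text word → Spec_plusOut text word (plusOut text word)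

-- ===== LEMMAS AND PROOFS =====

-- A's slice test at o is exactly "w is a prefix of t.drop o"
lemma sliceA_eq_iff (t w : List Char) (o : Nat) :
    PySem.List.slice t (some (o : Int)) (some ((o : Int) + (w.length : Int))) = w ↔ w <+: t.drop o := by
  rw [PySem.List.slice_natCast_add, List.prefix_iff_eq_take, eq_comm]

lemma aLoop_done (t w : List Char) (o : Nat) (fuel : Nat) (h : t.length ≤ o) :
    plusOutLoopA t w o fuel = [] := by
  cases fuel with
  | zero => rfl
  | succ n => simp [plusOutLoopA, Nat.not_lt.mpr h]

-- a run of d positions with no occurrence gives d '+'s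
lemma aLoop_skip (t w : List Char) (d : Nat) :
    ∀ (i fuel : Nat), (∀ o, i ≤ o → o < i + d → ¬ w <+: t.drop o) → i + d ≤ t.length →
      t.length - i ≤ fuel →
      plusOutLoopA t w i fuel = List.replicate d '+' ++ plusOutLoopA t w (i + d) (fuel - d) := by
  induction d with
  | zero => intro i fuel _ _ _; simp
  | succ d ih =>
    intro i fuel hno hle hfuel
    have hi : i < t.length := by omega
    obtain ⟨f, rfl⟩ : ∃ f, fuel = f + 1 := ⟨fuel - 1, by omega⟩
    have hslice : ¬ PySem.List.slice t (some (i : Int)) (some ((i : Int) + (w.length : Int))) = w := by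
      rw [sliceA_eq_iff]; exact hno i le_rfl (by omega)
    rw [plusOutLoopA, if_pos hi, if_neg hslice,
        ih (i + 1) f (fun o h1 h2 => hno o (by omega) (by omega)) (by omega) (by omega)]
    have h1 : i + 1 + d = i + (d + 1) := by omega
    have h2 : f - d = f + 1 - (d + 1) := by omega
    rw [List.replicate_succ, List.cons_append, h1, h2]

-- at a match position the loop emits w and advances by |w|
lemma aLoop_match (t w : List Char) (i fuel : Nat) (_hw : w ≠ [])
    (hpre : w <+: t.drop i) (hi : i < t.length) (hfuel : t.length - i ≤ fuel) :
    plusOutLoopA t w i fuel = w ++ plusOutLoopA t w (i + w.length) (fuel - 1) := by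
  obtain ⟨f, rfl⟩ : ∃ f, fuel = f + 1 := ⟨fuel - 1, by omega⟩
  rw [plusOutLoopA, if_pos hi, if_pos ((sliceA_eq_iff t w i).mpr hpre)]
  simp

lemma prefix_drop_infix (t w : List Char) (i o : Nat) (hio : i ≤ o) (h : w <+: t.drop o) :
    w <:+: t.drop i := by
  have h2 : t.drop o = (t.drop i).drop (o - i) := by
    rw [List.drop_drop]; congr 1; omega
  rw [List.infix_iff_prefix_suffix]
  exact ⟨t.drop o, h, by rw [h2]; exact List.drop_suffix _ _⟩

-- main loop equivalence, for word ≠ []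
lemma loops_eq (t w : List Char) (hw : w ≠ []) :
    ∀ (fB i fA : Nat), t.length - i ≤ fA → t.length - i ≤ fB →
      plusOutLoopA t w i fA = plusOutLoopB t w i fB := by
  intro fB
  induction fB with
  | zero =>
    intro i fA hA hB
    rw [aLoop_done t w i fA (by omega)]
    rfl
  | succ fB ih =>
    intro i fA hA hB
    by_cases hi : i < t.length
    · have hik : i ≤ t.length := le_of_lt hi
      rw [plusOutLoopB, if_pos hi]
      by_cases hj : PySem.Chars.findFrom t w (i : Int) none = -1
      · -- no occurrence at or after i
        have hnone : ¬ w <:+: t.drop i := (PySem.Chars.findFrom_natCast_eq_neg_one_iff t w i hik).mp hj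
        have hno : ∀ o, i ≤ o → o < i + (t.length - i) → ¬ w <+: t.drop o := by
          intro o h1 _ hpre
          exact hnone (prefix_drop_infix t w i o h1 hpre)
        rw [aLoop_skip t w (t.length - i) i fA hno (by omega) hA,
            aLoop_done t w _ _ (by omega)]
        simp [hj]
      · obtain ⟨hge, hpre, hmin⟩ := PySem.Chars.findFrom_natCast_spec t w i hik hj
        set j := PySem.Chars.findFrom t w (i : Int) none with hjdef
        have hj0 : 0 ≤ j := le_trans (by exact_mod_cast Int.natCast_nonneg i) hge
        have hgeN : i ≤ j.toNat := by omega
        have hle : j ≤ t.length := by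
          rw [hjdef, PySem.Chars.findFrom_natCast t w i hik]
          have h1 := PySem.Chars.find_le_length (t.drop i) w
          rw [List.length_drop] at h1
          split <;> omega
        have hlenN : j.toNat ≤ t.length := by omega
        have h5 := List.IsPrefix.length_le hpre
        rw [List.length_drop] at h5
        have hjlen := (Nat.le_sub_iff_add_le hlenN).mp h5
        have hwpos : 0 < w.length := List.length_pos_of_ne_nil hw
        have hstep :=
          aLoop_skip t w (j.toNat - i) i fA
            (fun o h1 h2 hp => hmin o h1 (by omega) hp)
            (by omega) hA
        rw [show i + (j.toNat - i) = j.toNat by omega] at hstep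
        rw [hstep, aLoop_match t w j.toNat _ hw hpre (by omega) (by omega),
            ih (j.toNat + w.length) _ (by omega) (by omega)]
        simp [if_neg hj]
    · rw [aLoop_done t w i fA (by omega), plusOutLoopB, if_neg hi]

-- ===== VERDICT (by name: the statement is the Claim_ definition above) =====
theorem plusOut_spec : Claim_equal_plusOut := by
  intro text word _ hpre
  unfold Spec_plusOut plusOut plusOut_alt
  rcases hpre with hw | ht
  · have hw' : word.toList ≠ [] := by
      intro h; exact hw (String.ext h)
    have h1 : word.length = word.toList.length := by simp
    rw [if_neg (by intro h; exact hw' (List.eq_nil_of_length_eq_zero (by omega)))]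
    rw [loops_eq text.toList word.toList hw' text.toList.length 0 text.toList.length
        (by omega) (by omega)]
  · subst ht
    have h0 : ("" : String).toList = [] := rfl
    rw [h0]
    by_cases h : word.length = 0
    · rw [if_pos h]; rfl
    · rw [if_neg h]; rfl
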